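-- pv_equiv track=rewrite | github.com/Yokaiiiii/Random-Coding-Practices | AlgoNetDotOrg Roadmap Leetcode Practice/maxNumberOfBalloon.py | copiedSolution
-- ===== SOURCE A (Python) =====
-- def copiedSolution(text):
--     d = {}
--     for c in text:
--         if c in 'ban':
--             d[c] = d.get(c, 0) + 2
--         elif c in 'lo':
--             d[c] = d.get(c, 0) + 1
--
--     if len(d.values()) >= 5:
--         return min(d.values()) // 2
--     return 0
-- ===== SOURCE B (Python) =====
-- def copiedSolution(text):
--     need = {'b': 1, 'a': 1, 'n': 1, 'l': 2, 'o': 2}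
--     return min(sum(1 for ch in text if ch == letter) // k
--                for letter, k in need.items())
-- ===== Notes on version B (the rewrite author's own statement) =====
-- stated objective: idiomatic
-- what changed: A makes one pass that accumulates a weighted dict (+2 for b/a/n, +1 for l/o, other characters skipped) and then returns min(values)//2 behind a len>=5 guard; B has no accumulator dict at all: it is driven by a static needs table {'b':1,'a':1,'n':1,'l':2,'o':2} and takes the min over five independent per-letter passes sum(1 for ch in text if ch == letter)//k, with no weighting, no guard and no values scan.
import Mathlib
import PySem

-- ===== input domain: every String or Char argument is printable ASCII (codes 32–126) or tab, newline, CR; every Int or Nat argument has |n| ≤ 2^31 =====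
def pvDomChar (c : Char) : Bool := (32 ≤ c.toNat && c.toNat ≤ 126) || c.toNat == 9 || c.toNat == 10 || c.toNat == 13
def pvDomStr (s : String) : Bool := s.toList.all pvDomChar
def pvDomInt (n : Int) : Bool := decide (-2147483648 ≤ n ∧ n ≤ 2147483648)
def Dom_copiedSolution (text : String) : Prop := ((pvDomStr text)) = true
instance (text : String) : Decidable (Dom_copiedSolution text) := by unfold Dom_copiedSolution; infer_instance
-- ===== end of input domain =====

-- B replaces A's single pass that accumulates a weighted dict (+2 for b/a/n, +1 for l/o, then
-- min(values)//2 behind a len>=5 guard) by a static needs table and five independent per-letter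
-- counting passes, min(count(letter)//need) taken over the table; idiomatic, not claimed faster.

-- ===== PORT A =====
-- the loop body of A: 'if c in "ban": d[c] = d.get(c,0)+2  elif c in "lo": d[c] = d.get(c,0)+1'
def pvStepA (d : PySem.Dict Char Int) (c : Char) : PySem.Dict Char Int :=
  if PySem.Chars.isIn [c] ['b', 'a', 'n'] then d.insert c (d.getD c 0 + 2)
  else if PySem.Chars.isIn [c] ['l', 'o'] then d.insert c (d.getD c 0 + 1)
  else d

-- the dict d after A's loop
def pvDictA (text : String) : PySem.Dict Char Int :=
  text.toList.foldl pvStepA PySem.Dict.empty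

def copiedSolution (text : String) : Int :=
  if 5 ≤ PySem.List.len (pvDictA text).values then
    match PySem.List.min? (pvDictA text).values (fun x => x) with
    | some m => PySem.Int.floordiv m 2
    | none => 0   -- unreachable: the guard makes the values list nonempty
  else 0

-- ===== PORT B =====
-- B's needs table: need = {'b': 1, 'a': 1, 'n': 1, 'l': 2, 'o': 2}, iterated via .items()
def pvNeed : List (Char × Int) := [('b', 1), ('a', 1), ('n', 1), ('l', 2), ('o', 2)]

-- B's per-letter pass: 'sum(1 for ch in text if ch == letter)'
def pvTally (text : String) (letter : Char) : Int :=
  text.toList.foldl (fun acc ch => if ch == letter then acc + 1 else acc) 0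

def copiedSolution_alt (text : String) : Int :=
  match PySem.List.min? (pvNeed.map (fun p => PySem.Int.floordiv (pvTally text p.1) p.2))
      (fun x => x) with
  | some m => m
  | none => 0   -- unreachable: pvNeed is nonempty

-- ===== PRECONDITION & SPEC =====
def Spec_copiedSolution (text : String) (out : Int) : Prop := out = copiedSolution_alt text
instance (text : String) (out : Int) : Decidable (Spec_copiedSolution text out) := by unfold Spec_copiedSolution; infer_instance

-- ===== CLAIM (what is proved, stated in full; the proofs are below) =====
def Claim_equal_copiedSolution : Prop := ∀ (text : String), Dom_copiedSolution text → Spec_copiedSolution text (copiedSolution text)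

-- ===== LEMMAS AND PROOFS =====

-- the weight A's loop gives each character
def pvWt (c : Char) : Int :=
  if c ∈ ['b', 'a', 'n'] then 2 else if c ∈ ['l', 'o'] then 1 else 0

lemma pv_isIn_single (c : Char) (l : List Char) :
    PySem.Chars.isIn [c] l = decide (c ∈ l) := by
  by_cases h : c ∈ l
  · obtain ⟨s, t, rfl⟩ := List.append_of_mem h
    simp [h, (PySem.Chars.isIn_iff_infix [c] (s ++ c :: t)).2 ⟨s, t, by simp⟩]
  · simp only [h, decide_false]
    rw [PySem.Chars.isIn_eq_false_iff]
    intro hinf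
    exact h (hinf.subset (List.mem_singleton_self c))

lemma pv_stepA_eq (d : PySem.Dict Char Int) (c : Char) :
    pvStepA d c =
      if c ∈ ['b', 'a', 'n'] then d.insert c (d.getD c 0 + 2)
      else if c ∈ ['l', 'o'] then d.insert c (d.getD c 0 + 1)
      else d := by
  simp [pvStepA, pv_isIn_single]

lemma pv_getD_fold (cs : List Char) : ∀ (d : PySem.Dict Char Int) (c0 : Char),
    (cs.foldl pvStepA d).getD c0 0 = d.getD c0 0 + pvWt c0 * cs.count c0 := by
  induction cs with
  | nil => intro d c0; simp
  | cons c cs ih =>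
    intro d c0
    rw [List.foldl_cons, ih, pv_stepA_eq]
    rcases eq_or_ne c0 c with rfl | hne
    · rw [List.count_cons_self]
      split_ifs with h1 h2
      · have hw : pvWt c0 = 2 := by simp [pvWt, h1]
        simp only [PySem.Dict.getD_insert_self, hw]
        push_cast
        ring
      · have hw : pvWt c0 = 1 := by simp [pvWt, h1, h2]
        simp only [PySem.Dict.getD_insert_self, hw]
        push_cast
        ring
      · have hw : pvWt c0 = 0 := by simp [pvWt, h1, h2]
        simp [hw]
    · rw [List.count_cons_of_ne hne.symm]
      split_ifs with h1 h2 <;> simp [PySem.Dict.getD_insert, hne]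

lemma pv_mem_keys_fold (cs : List Char) : ∀ (d : PySem.Dict Char Int) (c0 : Char),
    c0 ∈ (cs.foldl pvStepA d).keys ↔ c0 ∈ d.keys ∨ (c0 ∈ cs ∧ pvWt c0 ≠ 0) := by
  induction cs with
  | nil => intro d c0; simp
  | cons c cs ih =>
    intro d c0
    rw [List.foldl_cons, ih, pv_stepA_eq]
    rcases eq_or_ne c0 c with rfl | hne
    · split_ifs with h1 h2
      · have hw : pvWt c0 = 2 := by simp [pvWt, h1]
        simp [PySem.Dict.mem_keys_insert, hw]
      · have hw : pvWt c0 = 1 := by simp [pvWt, h1, h2]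
        simp [PySem.Dict.mem_keys_insert, hw]
      · have hw : pvWt c0 = 0 := by simp [pvWt, h1, h2]
        simp [hw]
    · split_ifs with h1 h2 <;>
        simp [PySem.Dict.mem_keys_insert, hne]

lemma pv_nodup_keys_fold (cs : List Char) : ∀ (d : PySem.Dict Char Int),
    d.keys.Nodup → (cs.foldl pvStepA d).keys.Nodup := by
  induction cs with
  | nil => intro d h; simpa using h
  | cons c cs ih =>
    intro d h
    rw [List.foldl_cons, pv_stepA_eq]
    split_ifs <;> [exact ih _ (PySem.Dict.nodup_keys_insert _ _ _ h);
                   exact ih _ (PySem.Dict.nodup_keys_insert _ _ _ h);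
                   exact ih _ h]

-- B's per-letter pass is the character count
lemma pv_tally_eq (text : String) (letter : Char) :
    pvTally text letter = (text.toList.count letter : Int) := by
  rw [pvTally, PySem.List.foldl_beq_add_one]
  simp

-- B's result written out as the nested min of the five divided counts
lemma pv_alt_eq (text : String) :
    copiedSolution_alt text =
      min (min (min (min (PySem.Int.floordiv (text.toList.count 'b' : Int) 1)
                         (PySem.Int.floordiv (text.toList.count 'a' : Int) 1))
                    (PySem.Int.floordiv (text.toList.count 'n' : Int) 1))
               (PySem.Int.floordiv (text.toList.count 'l' : Int) 2))
          (PySem.Int.floordiv (text.toList.count 'o' : Int) 2) := by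
  rw [copiedSolution_alt, pvNeed]
  simp only [List.map_cons, List.map_nil, pv_tally_eq]
  rw [PySem.List.min?_id_cons]
  simp [List.foldl]

-- ===== VERDICT (by name: the statement is the Claim_ definition above) =====
theorem copiedSolution_spec : Claim_equal_copiedSolution := by
  intro text _
  unfold Spec_copiedSolution copiedSolution
  rw [pv_alt_eq]
  set cs := text.toList with hcs
  set d := pvDictA text with hd
  have hnodup : d.keys.Nodup := pv_nodup_keys_fold cs _ (PySem.Dict.nodup_keys_empty)
  have hkeys : ∀ c0, c0 ∈ d.keys ↔ c0 ∈ cs ∧ pvWt c0 ≠ 0 := by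
    intro c0
    rw [hd, pvDictA, ← hcs, pv_mem_keys_fold]
    simp
  have hgetD : ∀ c0, d.getD c0 0 = pvWt c0 * cs.count c0 := by
    intro c0
    rw [hd, pvDictA, ← hcs, pv_getD_fold]
    simp
  have hvals : d.values = d.keys.map (fun k => d.getD k 0) :=
    PySem.Dict.values_eq_map_keys d hnodup 0
  rw [PySem.Int.floordiv_eq_ediv_of_pos (by norm_num : (0:Int) < 1),
      PySem.Int.floordiv_eq_ediv_of_pos (by norm_num : (0:Int) < 1),
      PySem.Int.floordiv_eq_ediv_of_pos (by norm_num : (0:Int) < 1),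
      PySem.Int.floordiv_eq_ediv_of_pos (by norm_num : (0:Int) < 2),
      PySem.Int.floordiv_eq_ediv_of_pos (by norm_num : (0:Int) < 2)]
  by_cases hall : 'b' ∈ cs ∧ 'a' ∈ cs ∧ 'n' ∈ cs ∧ 'l' ∈ cs ∧ 'o' ∈ cs
  · obtain ⟨hb, ha, hn, hl, ho⟩ := hall
    have hsub : ['b', 'a', 'n', 'l', 'o'] ⊆ d.keys := by
      intro x hx
      fin_cases hx <;> rw [hkeys] <;> exact ⟨by assumption, by decide⟩
    have hlen : 5 ≤ PySem.List.len d.values := by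
      have h5 : (5 : Nat) ≤ d.keys.length :=
        List.Subperm.length_le ((by decide : List.Nodup ['b', 'a', 'n', 'l', 'o']).subperm hsub)
      rw [PySem.List.len_eq, hvals, List.length_map]
      exact_mod_cast h5
    rw [if_pos hlen]
    obtain ⟨m, hm⟩ : ∃ m, PySem.List.min? d.values (fun x => x) = some m := by
      rcases hv : d.values with _ | ⟨v, vs⟩
      · rw [hv] at hlen
        simp [PySem.List.len_eq] at hlen
      · exact ⟨vs.foldl min v, PySem.List.min?_id_cons v vs⟩
    rw [hm]
    show PySem.Int.floordiv m 2 = _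
    have hmem := PySem.List.min?_mem hm
    have hlow := PySem.List.min?_isMin hm
    have hval_of : ∀ x ∈ d.keys, d.getD x 0 ∈ d.values := by
      intro x hx
      rw [hvals]
      exact List.mem_map_of_mem hx
    obtain ⟨x, hxk, hxe⟩ : ∃ x ∈ d.keys, m = d.getD x 0 := by
      rw [hvals] at hmem
      obtain ⟨x, hx, hxe⟩ := List.mem_map.mp hmem
      exact ⟨x, hx, hxe.symm⟩
    have hxform : m = 2 * (cs.count 'b' : Int) ∨ m = 2 * (cs.count 'a' : Int) ∨
        m = 2 * (cs.count 'n' : Int) ∨ m = (cs.count 'l' : Int) ∨ m = (cs.count 'o' : Int) := by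
      have hxw := (hkeys x).mp hxk
      have hx5 : x ∈ ['b', 'a', 'n', 'l', 'o'] := by
        rcases hxw with ⟨-, hw⟩
        by_contra hxm
        simp only [List.mem_cons, List.not_mem_nil, or_false, not_or] at hxm
        obtain ⟨h1, h2, h3, h4, h5⟩ := hxm
        exact hw (by simp [pvWt, h1, h2, h3, h4, h5])
      rw [hxe, hgetD]
      fin_cases hx5 <;> simp [pvWt]
    have hlow5 : m ≤ 2 * (cs.count 'b' : Int) ∧ m ≤ 2 * (cs.count 'a' : Int) ∧
        m ≤ 2 * (cs.count 'n' : Int) ∧ m ≤ (cs.count 'l' : Int) ∧ m ≤ (cs.count 'o' : Int) := by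
      refine ⟨?_, ?_, ?_, ?_, ?_⟩
      · have := hlow _ (hval_of 'b' (hsub (by decide)))
        rw [hgetD] at this
        simpa [pvWt] using this
      · have := hlow _ (hval_of 'a' (hsub (by decide)))
        rw [hgetD] at this
        simpa [pvWt] using this
      · have := hlow _ (hval_of 'n' (hsub (by decide)))
        rw [hgetD] at this
        simpa [pvWt] using this
      · have := hlow _ (hval_of 'l' (hsub (by decide)))
        rw [hgetD] at this
        simpa [pvWt] using this
      · have := hlow _ (hval_of 'o' (hsub (by decide)))
        rw [hgetD] at this
        simpa [pvWt] using this
    rw [PySem.Int.floordiv_eq_ediv_of_pos (by norm_num : (0:Int) < 2)]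
    omega
  · -- some letter is missing: A's guard fails, B's min hits a zero count
    have hkeysub : d.keys ⊆ ['b', 'a', 'n', 'l', 'o'] := by
      intro x hx
      have := ((hkeys x).mp hx).2
      by_contra hxm
      simp only [List.mem_cons, List.not_mem_nil, or_false, not_or] at hxm
      obtain ⟨h1, h2, h3, h4, h5⟩ := hxm
      exact this (by simp [pvWt, h1, h2, h3, h4, h5])
    obtain ⟨y, hy5, hyn⟩ : ∃ y ∈ ['b', 'a', 'n', 'l', 'o'], y ∉ cs := by
      by_contra h
      push Not at h
      exact hall ⟨h 'b' (by decide), h 'a' (by decide), h 'n' (by decide),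
                  h 'l' (by decide), h 'o' (by decide)⟩
    have hguard : ¬ 5 ≤ PySem.List.len d.values := by
      have hsub' : d.keys ⊆ (['b', 'a', 'n', 'l', 'o'] : List Char).erase y := by
        intro x hx
        refine (List.mem_erase_of_ne ?_).mpr (hkeysub hx)
        rintro rfl
        exact hyn ((hkeys x).mp hx).1
      have hle := List.Subperm.length_le (hnodup.subperm hsub')
      have hlen4 : ((['b', 'a', 'n', 'l', 'o'] : List Char).erase y).length = 4 := by
        rw [List.length_erase_of_mem hy5]
        rfl
      rw [PySem.List.len_eq, hvals, List.length_map]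
      omega
    rw [if_neg hguard]
    have hy0 : cs.count y = 0 := List.count_eq_zero.mpr hyn
    fin_cases hy5 <;> rw [hy0] <;> omega
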